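-- pv_equiv track=rewrite | github.com/42p4r4gu2/SecondSemester | PGKI/Assignments/5/excercise4.py | underscore
-- ===== SOURCE A (Python) =====
-- def underscore(x):
--     Str = str(x)
--     rest = len(Str) % 3
--     if rest != 0:
--         retStr = Str[0:rest]
--     else:
--         retStr = ""
--     for i in range(rest, len(Str)):
--         if (i-rest) % 3 == 0 and i != 0:
--             retStr= retStr +  "_"
--         retStr = retStr + Str[i]
--     return retStr
-- ===== SOURCE B (Python) =====
-- def underscore(x):
--     s = str(x)
--     out = s[-3:]
--     s = s[:-3]
--     while s:
--         out = s[-3:] + "_" + out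
--         s = s[:-3]
--     return out
-- ===== Notes on version B (the rewrite author's own statement) =====
-- stated objective: simpler
-- what changed: Replaces the per-character loop with modular-position branching by a right-to-left loop that peels three-character slices off the end and prepends them with underscores.
import Mathlib
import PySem

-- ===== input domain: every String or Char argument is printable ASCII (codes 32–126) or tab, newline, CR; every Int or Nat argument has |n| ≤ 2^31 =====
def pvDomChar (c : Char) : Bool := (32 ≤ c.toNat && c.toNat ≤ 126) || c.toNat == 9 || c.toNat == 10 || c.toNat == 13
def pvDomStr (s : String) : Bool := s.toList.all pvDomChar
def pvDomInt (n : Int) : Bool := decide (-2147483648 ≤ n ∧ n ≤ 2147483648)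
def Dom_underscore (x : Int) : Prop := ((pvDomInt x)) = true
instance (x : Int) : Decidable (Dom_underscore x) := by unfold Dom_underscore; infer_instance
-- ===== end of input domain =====

-- B replaces A's left-to-right per-character loop with its modular-position branch by a
-- right-to-left loop peeling three-character slices off the end; objective: simpler.

-- ===== PORT A =====
-- A's body applied to the character list of str(x)
def underscoreCore (s : List Char) : List Char :=
  let rest : Int := PySem.Int.mod (s.length : Int) 3
  let retStr : List Char := if rest ≠ 0 then PySem.List.slice s (some 0) (some rest) else []
  (PySem.List.pyRange rest (s.length : Int) 1).foldl
    (fun acc i =>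
      (if PySem.Int.mod (i - rest) 3 = 0 ∧ i ≠ 0 then acc ++ ['_'] else acc)
        ++ [PySem.List.pyGetD s i ' ']) retStr

def underscore (x : Int) : String :=
  String.ofList (underscoreCore (PySem.Int.toChars x))

-- ===== PORT B =====
-- B's while loop: each turn prepends s[-3:] and an underscore to out, s becomes s[:-3]
def underscoreRec (s : List Char) (out : List Char) : List Char :=
  if h : s = [] then out
  else underscoreRec (PySem.List.slice s none (some (-3)))
                     (PySem.List.slice s (some (-3)) none ++ '_' :: out)
termination_by s.length
decreasing_by
  rw [PySem.List.slice_to_neg_ofNat s 3 (by omega)]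
  have h0 : s.length ≠ 0 := by simpa using h
  simp [List.length_take]
  omega

-- out starts as s[-3:], the loop starts on s[:-3]
def underscore_alt (x : Int) : String :=
  String.ofList (underscoreRec (PySem.List.slice (PySem.Int.toChars x) none (some (-3)))
                               (PySem.List.slice (PySem.Int.toChars x) (some (-3)) none))

-- ===== PRECONDITION & SPEC =====
def Spec_underscore (x : Int) (out : String) : Prop := out = underscore_alt x
instance (x : Int) (out : String) : Decidable (Spec_underscore x out) := by unfold Spec_underscore; infer_instance

-- ===== CLAIM (what is proved, stated in full; the proofs are below) =====
def Claim_equal_underscore : Prop := ∀ (x : Int), Dom_underscore x → Spec_underscore x (underscore x)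

-- ===== LEMMAS AND PROOFS =====

-- B's accumulator is only ever prepended to, so a suffix of out passes through unchanged
theorem rec_append (s o1 o2 : List Char) :
    underscoreRec s (o1 ++ o2) = underscoreRec s o1 ++ o2 := by
  by_cases hs : s = []
  · subst hs; simp [underscoreRec]
  · conv_lhs => rw [underscoreRec]
    conv_rhs => rw [underscoreRec]
    rw [dif_neg hs, dif_neg hs]
    have := rec_append (PySem.List.slice s none (some (-3)))
      (PySem.List.slice s (some (-3)) none ++ '_' :: o1) o2
    simpa using this
termination_by s.length
decreasing_by
  rw [PySem.List.slice_to_neg_ofNat s 3 (by omega)]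
  have h0 : s.length ≠ 0 := by simpa using hs
  simp [List.length_take]
  omega

-- on at most three characters A inserts no underscore and returns the string itself
theorem core_small (s : List Char) (h : s.length ≤ 3) : underscoreCore s = s := by
  match s, h with
  | [], _ => rfl
  | [a], _ =>
    simp only [underscoreCore, List.length_cons, List.length_nil]
    norm_num
    rfl
  | [a,b], _ =>
    simp only [underscoreCore, List.length_cons, List.length_nil]
    norm_num
    rfl
  | [a,b,c], _ =>
    simp only [underscoreCore, List.length_cons, List.length_nil]
    norm_num
    rw [PySem.List.pyRange_one_cons (by norm_num), PySem.List.pyRange_one_cons (by norm_num),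
        PySem.List.pyRange_one_cons (by norm_num)]
    norm_num [pysem, PySem.List.pyRange_one_eq_nil]
    rfl

-- A's loop on s splits into A's loop on the first |s|-3 characters, an underscore,
-- and the last three characters
theorem core_step (s : List Char) (h : 4 ≤ s.length) :
    underscoreCore s
      = underscoreCore (s.take (s.length - 3)) ++ '_' :: s.drop (s.length - 3) := by
  have hn : s.length = (s.length - 3) + 3 := by omega
  set n := s.length with hnn
  set m := n - 3 with hm
  have hlt : (s.take m).length = m := by simp; omega
  have hrm : (m : Int) % 3 = (n : Int) % 3 := by omega
  have hmod : ∀ k : Nat, PySem.Int.mod (k:Int) 3 = ((k % 3 : Nat) : Int) := fun k => by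
    exact_mod_cast PySem.Int.mod_natCast k 3
  set r := n % 3 with hr
  have hrm3 : m % 3 = r := by omega
  have hrle : r ≤ m := by omega
  unfold underscoreCore
  simp only [hlt, hmod, hrm3, ← hnn, ← hr]
  rw [PySem.List.pyRange_one_append (↑r) (↑m) (↑n) (by exact_mod_cast hrle) (by exact_mod_cast (by omega : m ≤ n)),
      List.foldl_append]
  rw [PySem.List.slice_zero_start, PySem.List.slice_to_natCast,
      PySem.List.slice_zero_start, PySem.List.slice_to_natCast, List.take_take,
      show min r m = r from by omega]
  rw [PySem.List.foldl_congr_mem (PySem.List.pyRange (↑r) (↑m))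
        _ (fun acc i => (if PySem.Int.mod (i - ↑r) 3 = 0 ∧ i ≠ 0 then acc ++ ['_'] else acc)
             ++ [PySem.List.pyGetD (List.take m s) i ' ']) _
        (by
          intro acc i hi
          rw [PySem.List.mem_pyRange_one] at hi
          have h0 : (0:Int) ≤ i := by omega
          have h1 : i < ((List.take m s).length : Int) := by rw [hlt]; omega
          have h2 : i < (s.length : Int) := by rw [← hnn]; omega
          simp only [PySem.List.pyGetD_eq_getElem s ' ' h0 h2,
                     PySem.List.pyGetD_eq_getElem (List.take m s) ' ' h0 h1,
                     List.getElem_take])]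
  have e3 : (PySem.List.pyRange (↑m) (↑n) : List Int) = [(m:Int), (m:Int)+1, (m:Int)+1+1] := by
    rw [PySem.List.pyRange_one_cons (by omega : (m:Int) < ↑n),
        PySem.List.pyRange_one_cons (by omega : (m:Int)+1 < ↑n),
        PySem.List.pyRange_one_cons (by omega : (m:Int)+1+1 < ↑n),
        PySem.List.pyRange_one_eq_nil (by omega : (n:Int) ≤ ↑m+1+1+1)]
  rw [e3]
  simp only [List.foldl_cons, List.foldl_nil]
  rw [if_pos (show PySem.Int.mod ((m:Int) - ↑r) 3 = 0 ∧ ((m:Int)) ≠ 0 from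
        ⟨by rw [PySem.Int.mod_eq_zero_iff_dvd]; omega, by omega⟩),
      if_neg (by rw [PySem.Int.mod_eq_zero_iff_dvd]; omega : ¬ (PySem.Int.mod ((m:Int)+1 - ↑r) 3 = 0 ∧ ((m:Int)+1) ≠ 0)),
      if_neg (by rw [PySem.Int.mod_eq_zero_iff_dvd]; omega : ¬ (PySem.Int.mod ((m:Int)+1+1 - ↑r) 3 = 0 ∧ ((m:Int)+1+1) ≠ 0))]
  have g0 : PySem.List.pyGetD s (↑m) ' ' = s[m]'(by omega) := by
    rw [PySem.List.pyGetD_eq_getElem s ' ' (by omega) (by rw [← hnn]; omega)]; congr 1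
  have g1 : PySem.List.pyGetD s ((m:Int)+1) ' ' = s[m+1]'(by omega) := by
    rw [PySem.List.pyGetD_eq_getElem s ' ' (by omega) (by rw [← hnn]; omega)]; congr 1
  have g2 : PySem.List.pyGetD s ((m:Int)+1+1) ' ' = s[m+2]'(by omega) := by
    rw [PySem.List.pyGetD_eq_getElem s ' ' (by omega) (by rw [← hnn]; omega)]; congr 1
  rw [g0, g1, g2]
  have hd : List.drop m s = [s[m]'(by omega), s[m+1]'(by omega), s[m+2]'(by omega)] := by
    rw [List.drop_eq_getElem_cons (by omega), List.drop_eq_getElem_cons (by omega),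
        List.drop_eq_getElem_cons (by omega), List.drop_eq_nil_of_le (by omega)]
  rw [hd]
  simp

-- main invariant: A on s equals B's loop started on s[:-3] with accumulator s[-3:]
theorem core_main (s : List Char) :
    underscoreCore s = underscoreRec (s.take (s.length - 3)) (s.drop (s.length - 3)) := by
  by_cases h : s.length ≤ 3
  · rw [core_small s h, show s.length - 3 = 0 from by omega]
    simp [underscoreRec]
  · have hlt : (s.take (s.length - 3)).length = s.length - 3 := by
      rw [List.length_take]; omega
    have hne : s.take (s.length - 3) ≠ [] := by
      intro he; rw [he] at hlt; simp at hlt; omega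
    rw [core_step s (by omega), underscoreRec, dif_neg hne,
        PySem.List.slice_to_neg_ofNat _ 3 (by omega),
        PySem.List.slice_from_neg_ofNat _ 3 (by omega),
        rec_append, ← core_main (s.take (s.length - 3))]
termination_by s.length
decreasing_by
  rw [List.length_take]; omega

-- ===== VERDICT (by name: the statement is the Claim_ definition above) =====
theorem underscore_spec : Claim_equal_underscore := by
  intro x _
  unfold Spec_underscore underscore underscore_alt
  rw [PySem.List.slice_to_neg_ofNat _ 3 (by omega),
      PySem.List.slice_from_neg_ofNat _ 3 (by omega), core_main]
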